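-- pv_equiv track=rewrite | github.com/Pandaemonium/CausalOctonionGraph | calc/test_h7_sign.py | _is_positive_pair
-- ===== SOURCE A (Python) =====
-- FANO_LINES = [
--     (1, 2, 3),  # L1
--     (1, 4, 5),  # L2
--     (1, 7, 6),  # L3
--     (2, 4, 6),  # L4
--     (2, 5, 7),  # L5
--     (3, 4, 7),  # L6
--     (3, 6, 5),  # L7
-- ]
--
-- def _is_positive_pair(i: int, j: int) -> bool:
--     """Check if (i, j) is a positive (cyclic) ordered pair in the Fano lines."""
--     for (a, b, c) in FANO_LINES:
--         # Direct: (a,b), cyclic: (b,c), (c,a)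
--         if a == i and b == j:
--             return True
--         if b == i and c == j:
--             return True
--         if c == i and a == j:
--             return True
--     return False
-- ===== SOURCE B (Python) =====
-- # Arithmetical/table formulation: row i of POS_MASK is a bitmask whose bit j is
-- # set exactly when (i, j) is a positive cyclic pair; the scan over FANO_LINES
-- # is replaced by a bounds check plus one shift-and-mask.
-- POS_MASK = [0, 148, 56, 82, 224, 138, 38, 76]
--
-- def _is_positive_pair(i: int, j: int) -> bool:
--     """Check if (i, j) is a positive (cyclic) ordered pair in the Fano lines."""
--     return 0 < i < 8 and 0 < j < 8 and bool(POS_MASK[i] >> j & 1)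
-- ===== Notes on version B (the rewrite author's own statement) =====
-- stated objective: alternative
-- what changed: Replaces the per-call scan over the 7 Fano triples (three ordered-pair equality tests each) by a purely arithmetical formulation: an 8-entry bitmask table indexed by i, where bit j of row i encodes positivity, so the function is a bounds check plus one shift-and-mask.
import Mathlib
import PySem

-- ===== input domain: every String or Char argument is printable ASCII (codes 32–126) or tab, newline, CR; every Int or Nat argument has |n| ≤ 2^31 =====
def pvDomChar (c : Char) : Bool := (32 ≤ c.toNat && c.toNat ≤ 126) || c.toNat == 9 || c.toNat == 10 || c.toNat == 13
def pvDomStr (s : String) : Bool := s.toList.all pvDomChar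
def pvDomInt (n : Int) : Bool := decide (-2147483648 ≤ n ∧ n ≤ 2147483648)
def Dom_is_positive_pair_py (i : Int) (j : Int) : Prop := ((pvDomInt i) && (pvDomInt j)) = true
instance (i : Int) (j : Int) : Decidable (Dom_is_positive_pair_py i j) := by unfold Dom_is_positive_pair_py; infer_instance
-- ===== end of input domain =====

-- B replaces A's per-call scan of the 7 Fano triples by an arithmetical table:
-- an 8-entry bitmask list where bit j of row i encodes positivity (alternative formulation).

-- ===== PORT A =====
def FANO_LINES : List (Int × Int × Int) :=
  [(1, 2, 3), (1, 4, 5), (1, 7, 6), (2, 4, 6), (2, 5, 7), (3, 4, 7), (3, 6, 5)]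

-- the 'for' loop with early 'return True', as structural recursion over FANO_LINES
def pvLoopA (lines : List (Int × Int × Int)) (i j : Int) : Bool :=
  match lines with
  | [] => false
  | (a, b, c) :: rest =>
    if a == i && b == j then true
    else if b == i && c == j then true
    else if c == i && a == j then true
    else pvLoopA rest i j

def is_positive_pair_py (i : Int) (j : Int) : Bool :=
  pvLoopA FANO_LINES i j

-- ===== PORT B =====
-- POS_MASK = [0, 148, 56, 82, 224, 138, 38, 76]
def POS_MASK : List Int := [0, 148, 56, 82, 224, 138, 38, 76]

-- 0 < i < 8 and 0 < j < 8 and bool(POS_MASK[i] >> j & 1)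
-- '>>' on the nonnegative literals of POS_MASK with shift 0<j<8 is exact as Nat shiftRight
-- after the guard; POS_MASK[i] with 0<i<8 is an in-range index (PySem.List.pyGet?).
def is_positive_pair_py_alt (i : Int) (j : Int) : Bool :=
  decide (0 < i ∧ i < 8) &&
  (decide (0 < j ∧ j < 8) &&
   (((PySem.List.pyGet? POS_MASK i).getD 0).toNat >>> j.toNat &&& 1 != 0))

-- ===== PRECONDITION & SPEC =====
def Spec_is_positive_pair_py (i : Int) (j : Int) (out : Bool) : Prop := out = is_positive_pair_py_alt i j
instance (i : Int) (j : Int) (out : Bool) : Decidable (Spec_is_positive_pair_py i j out) := by unfold Spec_is_positive_pair_py; infer_instance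

-- ===== CLAIM (what is proved, stated in full; the proofs are below) =====
def Claim_equal_is_positive_pair_py : Prop := ∀ (i : Int) (j : Int), Dom_is_positive_pair_py i j → Spec_is_positive_pair_py i j (is_positive_pair_py i j)

-- ===== LEMMAS AND PROOFS =====
theorem pvLoopA_true_mem (lines : List (Int × Int × Int)) (i j : Int)
    (h : pvLoopA lines i j = true) :
    ∃ l ∈ lines, (l.1 = i ∧ l.2.1 = j) ∨ (l.2.1 = i ∧ l.2.2 = j) ∨ (l.2.2 = i ∧ l.1 = j) := by
  induction lines with
  | nil => simp [pvLoopA] at h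
  | cons hd tl ih =>
    obtain ⟨a, b, c⟩ := hd
    simp only [pvLoopA] at h
    split_ifs at h with h1 h2 h3
    · exact ⟨(a, b, c), by simp, Or.inl (by simpa [Bool.and_eq_true, beq_iff_eq] using h1)⟩
    · exact ⟨(a, b, c), by simp, Or.inr (Or.inl (by simpa [Bool.and_eq_true, beq_iff_eq] using h2))⟩
    · exact ⟨(a, b, c), by simp, Or.inr (Or.inr (by simpa [Bool.and_eq_true, beq_iff_eq] using h3))⟩
    · obtain ⟨l, hl, hp⟩ := ih h
      exact ⟨l, by simp [hl], hp⟩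

theorem pv_outA (i j : Int) (h : ¬((0 < i ∧ i < 8) ∧ 0 < j ∧ j < 8)) :
    is_positive_pair_py i j = false := by
  by_contra hne
  obtain ⟨l, hl, hp⟩ := pvLoopA_true_mem FANO_LINES i j
    (by simpa [is_positive_pair_py] using Bool.of_not_eq_false hne)
  fin_cases hl <;> (simp only at hp; omega)

theorem pv_outB (i j : Int) (h : ¬((0 < i ∧ i < 8) ∧ 0 < j ∧ j < 8)) :
    is_positive_pair_py_alt i j = false := by
  simp only [is_positive_pair_py_alt]
  rcases not_and_or.mp h with h' | h'
  · simp [decide_eq_false h']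
  · simp [decide_eq_false h']

theorem pv_eq (i j : Int) : is_positive_pair_py i j = is_positive_pair_py_alt i j := by
  by_cases h : (0 < i ∧ i < 8) ∧ 0 < j ∧ j < 8
  · obtain ⟨⟨hi1, hi2⟩, hj1, hj2⟩ := h
    interval_cases i <;> interval_cases j <;> decide
  · rw [pv_outA i j h, pv_outB i j h]

-- ===== VERDICT (by name: the statement is the Claim_ definition above) =====
theorem is_positive_pair_py_spec : Claim_equal_is_positive_pair_py := by
  intro i j _
  exact pv_eq i j
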